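-- pv_equiv track=rewrite | github.com/Sunho12/algorithm | 우선순위큐/백준11946.py | max_fullness
-- ===== SOURCE A (Python) =====
-- import heapq
--
-- def max_fullness(t, a, b):
--     visited = [[False] * 2 for _ in range(t+1)] #[fullness][물 마셨는 지]
--     pq = [( -0, 0, 0)] # (-fullness, fullness, drank_water)
--
--     max_full = 0
--
--     while pq:
--         neg_f, f, water = heapq.heappop(pq)
--         visited[f][water] = True
--         max_full = max(max_full, f)
--
--         # orange
--         if f + a <= t and not visited[f+a][water]:
--             heapq.heappush(pq, (-(f + a), f+a, water))
--         # lemon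
--         if f + b <= t and not visited[f+b][water]:
--             heapq.heappush(pq, (-(f + b), f+b, water))
--
--         if water == 0:
--             new_f = f // 2
--             if not visited[new_f][1]:
--                 heapq.heappush(pq, (-new_f, new_f, 1))
--
--     return max_full
-- ===== SOURCE B (Python) =====
-- def max_fullness(t, a, b):
--     # Depth-first search over states (fullness, drank_water) with a visited set:
--     # no heap and no O(t) visited table.
--     seen = set()
--     stack = [(0, 0)]
--     best = 0
--     while stack:
--         f, w = stack.pop()
--         if (f, w) in seen:
--             continue
--         seen.add((f, w))
--         if f > best:
--             best = f
--         if f + a <= t: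
--             stack.append((f + a, w))
--         if f + b <= t:
--             stack.append((f + b, w))
--         if w == 0:
--             stack.append((f // 2, 1))
--     return best
-- ===== Notes on version B (the rewrite author's own statement) =====
-- stated objective: faster
-- what changed: Replaced the heapq best-first search with its O(t) visited table by a plain DFS over (fullness, drank_water) states using a stack and a hash set of seen states, so the heap's log factor and the t+1-row table disappear.
-- outside the precondition, e.g. on max_fullness(5, -1, 3): A returns 5, B does not finish within the time limit; on max_fullness(5, 3, -2): A returns 5, B does not finish within the time limit; on max_fullness(-1, 1, 1): A raises IndexError, B returns 0
import Mathlib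
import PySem

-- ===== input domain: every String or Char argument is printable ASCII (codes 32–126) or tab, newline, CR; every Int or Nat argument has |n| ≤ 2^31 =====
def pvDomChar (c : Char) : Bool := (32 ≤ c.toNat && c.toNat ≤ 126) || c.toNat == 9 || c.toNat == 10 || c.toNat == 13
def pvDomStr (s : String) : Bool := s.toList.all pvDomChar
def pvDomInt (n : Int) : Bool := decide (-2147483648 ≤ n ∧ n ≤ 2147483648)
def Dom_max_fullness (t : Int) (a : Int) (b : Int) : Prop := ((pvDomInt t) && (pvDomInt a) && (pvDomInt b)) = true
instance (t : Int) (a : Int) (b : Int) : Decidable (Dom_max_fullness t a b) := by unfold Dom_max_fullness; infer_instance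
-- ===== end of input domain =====

-- B replaces A's heapq best-first search (with its O(t)-row visited table) by a plain DFS over
-- (fullness, drank_water) states with a seen-set; measurably faster (no heap, no t+1-row table).
-- A's heap is modelled by a list kept sorted under Python's tuple '<' (heappush = ordered insert,
-- heappop = take the minimum): extensionally heapq's behaviour for this use.


-- ===== PORT A =====

-- Python tuple '<' on the heap's (-fullness, fullness, drank_water) triples
def pyLt3 (x y : Int × Int × Int) : Bool :=
  decide (x.1 < y.1 ∨ (x.1 = y.1 ∧ (x.2.1 < y.2.1 ∨ (x.2.1 = y.2.1 ∧ x.2.2 < y.2.2))))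

-- heapq.heappush: insert keeping the list sorted (heappop is then 'take the head', i.e. the minimum)
def heapPush (x : Int × Int × Int) : List (Int × Int × Int) → List (Int × Int × Int)
  | [] => [x]
  | y :: ys => if pyLt3 x y then x :: y :: ys else y :: heapPush x ys

-- visited[f][water] (Python list indexing, incl. negative wraparound, via PySem pyGetD/pySetD;
-- the out-of-range default arms are only reached outside Pre_)
def getVis (vis : List (List Bool)) (f w : Int) : Bool :=
  PySem.List.pyGetD (PySem.List.pyGetD vis f []) w false

def setVis (vis : List (List Bool)) (f w : Int) : List (List Bool) :=
  PySem.List.pySetD vis f (PySem.List.pySetD (PySem.List.pyGetD vis f []) w true)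

-- the while-loop of A; fuel only makes the recursion total (proved sufficient under Pre_)
def loopA (t a b : Int) : Nat → List (List Bool) → List (Int × Int × Int) → Int → Int
  | _, _, [], mf => mf
  | 0, _, _, mf => mf
  | fuel+1, vis, e :: rest, mf =>
    let f := e.2.1
    let w := e.2.2
    let vis1 := setVis vis f w
    let mf1 := max mf f
    let pq1 := if f + a ≤ t ∧ ¬ (getVis vis1 (f + a) w = true) then heapPush (-(f + a), f + a, w) rest else rest
    let pq2 := if f + b ≤ t ∧ ¬ (getVis vis1 (f + b) w = true) then heapPush (-(f + b), f + b, w) pq1 else pq1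
    let pq3 := if w = 0 then
                 (if ¬ (getVis vis1 (PySem.Int.floordiv f 2) 1 = true) then
                    heapPush (-(PySem.Int.floordiv f 2), PySem.Int.floordiv f 2, 1) pq2
                  else pq2)
               else pq2
    loopA t a b fuel vis1 pq3 mf1

def max_fullness (t : Int) (a : Int) (b : Int) : Int :=
  let vis := (PySem.List.pyRange 0 (t + 1) 1).map (fun _ => [false, false])
  loopA t a b (4 ^ (2 * (t.toNat + 2))) vis [(0, 0, 0)] 0

-- ===== PORT B =====

-- the while-loop of B; stack represented head-first (head = Python's list end, where pop/append act);
-- fuel only makes the recursion total (proved sufficient under Pre_)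
def loopB (t a b : Int) : Nat → PySem.Set (Int × Int) → List (Int × Int) → Int → Int
  | _, _, [], best => best
  | 0, _, _, best => best
  | fuel+1, seen, s :: stack, best =>
    if s ∈ seen then loopB t a b fuel seen stack best
    else
      let seen1 := PySem.Set.add seen s
      let best1 := if s.1 > best then s.1 else best
      let st1 := if s.1 + a ≤ t then (s.1 + a, s.2) :: stack else stack
      let st2 := if s.1 + b ≤ t then (s.1 + b, s.2) :: st1 else st1
      let st3 := if s.2 = 0 then (PySem.Int.floordiv s.1 2, 1) :: st2 else st2
      loopB t a b fuel seen1 st3 best1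

def max_fullness_alt (t : Int) (a : Int) (b : Int) : Int :=
  loopB t a b (8 * (t.toNat + 1) + 2) PySem.Set.empty [(0, 0)] 0

-- ===== PRECONDITION & SPEC =====
-- Pre_ restricts to the problem's natural domain t ≥ 0, a ≥ 0, b ≥ 0: for t < 0 A raises
-- IndexError, and for negative a or b A's value (when it returns at all) is an accident of
-- negative-index wraparound into the visited table, while B's search does not terminate there.
def Pre_max_fullness (t : Int) (a : Int) (b : Int) : Prop := 0 ≤ t ∧ 0 ≤ a ∧ 0 ≤ b
instance (t : Int) (a : Int) (b : Int) : Decidable (Pre_max_fullness t a b) := by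
  unfold Pre_max_fullness; infer_instance

def pvWitness_max_fullness : Int × Int × Int := (10, 2, 3)

def Spec_max_fullness (t : Int) (a : Int) (b : Int) (out : Int) : Prop := out = max_fullness_alt t a b
instance (t : Int) (a : Int) (b : Int) (out : Int) : Decidable (Spec_max_fullness t a b out) := by
  unfold Spec_max_fullness; infer_instance

-- ===== CLAIM (what is proved, stated in full; the proofs are below) =====
def Claim_equal_max_fullness : Prop := ∀ (t : Int) (a : Int) (b : Int), Dom_max_fullness t a b → Pre_max_fullness t a b → Spec_max_fullness t a b (max_fullness t a b)

-- ===== LEMMAS AND PROOFS =====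

-- a state (fullness, drank_water) within bounds
def InR (t : Int) (s : Int × Int) : Prop := 0 ≤ s.1 ∧ s.1 ≤ t ∧ (s.2 = 0 ∨ s.2 = 1)

-- the states reachable from (0, 0) by the three moves
inductive Reach (t a b : Int) : Int × Int → Prop
  | init : Reach t a b (0, 0)
  | stepA {f w : Int} : Reach t a b (f, w) → f + a ≤ t → Reach t a b (f + a, w)
  | stepB {f w : Int} : Reach t a b (f, w) → f + b ≤ t → Reach t a b (f + b, w)
  | half {f : Int} : Reach t a b (f, 0) → Reach t a b (PySem.Int.floordiv f 2, 1)

-- one move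
def Step (t a b : Int) (s n : Int × Int) : Prop :=
  (s.1 + a ≤ t ∧ n = (s.1 + a, s.2)) ∨ (s.1 + b ≤ t ∧ n = (s.1 + b, s.2)) ∨
  (s.2 = 0 ∧ n = (PySem.Int.floordiv s.1 2, 1))

theorem Reach_of_step {t a b : Int} {s n : Int × Int} (hr : Reach t a b s) (hs : Step t a b s n) :
    Reach t a b n := by
  have hr' : Reach t a b (s.1, s.2) := by simpa using hr
  rcases hs with ⟨hle, rfl⟩ | ⟨hle, rfl⟩ | ⟨hw, rfl⟩
  · exact Reach.stepA hr' hle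
  · exact Reach.stepB hr' hle
  · exact Reach.half (by rw [← hw]; simpa using hr)

theorem floordiv_two_bounds {f : Int} (hf : 0 ≤ f) :
    0 ≤ PySem.Int.floordiv f 2 ∧ PySem.Int.floordiv f 2 ≤ f := by
  rw [PySem.Int.floordiv_eq_ediv_of_pos (by norm_num)]
  omega

theorem InR_of_step {t a b : Int} (ha : 0 ≤ a) (hb : 0 ≤ b) {s n : Int × Int}
    (hs : InR t s) (hstep : Step t a b s n) : InR t n := by
  obtain ⟨h0, h1, h2⟩ := hs
  rcases hstep with ⟨hle, rfl⟩ | ⟨hle, rfl⟩ | ⟨hw, rfl⟩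
  · exact ⟨by omega, hle, h2⟩
  · exact ⟨by omega, hle, h2⟩
  · have := floordiv_two_bounds h0
    exact ⟨this.1, by omega, Or.inr rfl⟩

theorem reach_subset_closed {t a b : Int} (V : Int × Int → Prop) (h0 : V (0, 0))
    (hcl : ∀ s, V s → ∀ n, Step t a b s n → V n) : ∀ s, Reach t a b s → V s := by
  intro s hr
  induction hr with
  | init => exact h0
  | stepA hr hle ih => exact hcl _ ih _ (Or.inl ⟨hle, rfl⟩)
  | stepB hr hle ih => exact hcl _ ih _ (Or.inr (Or.inl ⟨hle, rfl⟩))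
  | half hr ih => exact hcl _ ih _ (Or.inr (Or.inr ⟨rfl, rfl⟩))

-- ----- B side -----

theorem length_le_card (t : Int) (l : List (Int × Int)) (hnd : l.Nodup)
    (hin : ∀ x ∈ l, InR t x) : l.length ≤ 2 * (t.toNat + 1) := by
  classical
  have hmap : (l.map (fun s : Int × Int => s.2.toNat * (t.toNat + 1) + s.1.toNat)).Nodup := by
    refine List.Nodup.map_on ?_ hnd
    rintro ⟨x1, x2⟩ hx ⟨y1, y2⟩ hy hxy
    obtain ⟨hx0, hx1, hx2⟩ := hin _ hx
    obtain ⟨hy0, hy1, hy2⟩ := hin _ hy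
    have hx0' : 0 ≤ x1 := hx0
    have hx1' : x1 ≤ t := hx1
    have hy0' : 0 ≤ y1 := hy0
    have hy1' : y1 ≤ t := hy1
    have hx2' : x2 = 0 ∨ x2 = 1 := hx2
    have hy2' : y2 = 0 ∨ y2 = 1 := hy2
    have hxy' : x2.toNat * (t.toNat + 1) + x1.toNat = y2.toNat * (t.toNat + 1) + y1.toNat := hxy
    have hgoal : x1 = y1 ∧ x2 = y2 := by
      rcases hx2' with rfl | rfl <;> rcases hy2' with rfl | rfl <;>
        simp only [Int.toNat_zero, Int.toNat_one, zero_mul, one_mul, zero_add] at hxy' <;> omega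
    simp only [Prod.mk.injEq]
    exact hgoal
  have hsub : (l.map (fun s : Int × Int => s.2.toNat * (t.toNat + 1) + s.1.toNat)).toFinset ⊆
      Finset.range (2 * (t.toNat + 1)) := by
    intro k hk
    simp only [List.mem_toFinset, List.mem_map] at hk
    obtain ⟨⟨x1, x2⟩, hx, rfl⟩ := hk
    obtain ⟨hx0, hx1, hx2⟩ := hin _ hx
    have hx0' : 0 ≤ x1 := hx0
    have hx1' : x1 ≤ t := hx1
    have hx2' : x2 = 0 ∨ x2 = 1 := hx2
    simp only [Finset.mem_range]
    rcases hx2' with rfl | rfl <;>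
      simp only [Int.toNat_zero, Int.toNat_one, zero_mul, one_mul, zero_add] <;> omega
  have := Finset.card_le_card hsub
  rw [List.toFinset_card_of_nodup hmap, Finset.card_range, List.length_map] at this
  exact this

def pushes (t a b : Int) (s : Int × Int) (st : List (Int × Int)) : List (Int × Int) :=
  (if s.2 = 0 then [(PySem.Int.floordiv s.1 2, 1)] else []) ++
  (if s.1 + b ≤ t then [(s.1 + b, s.2)] else []) ++
  (if s.1 + a ≤ t then [(s.1 + a, s.2)] else []) ++ st

theorem mem_pushes {t a b : Int} {s n : Int × Int} {st : List (Int × Int)}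
    (hn : n ∈ pushes t a b s st) : Step t a b s n ∨ n ∈ st := by
  unfold pushes at hn
  unfold Step
  split_ifs at hn <;> simp only [List.mem_append, List.mem_singleton,
    List.not_mem_nil, or_false, false_or] at hn <;> tauto

theorem step_mem_pushes {t a b : Int} {s n : Int × Int} {st : List (Int × Int)}
    (hn : Step t a b s n) : n ∈ pushes t a b s st := by
  unfold pushes
  rcases hn with ⟨hle, rfl⟩ | ⟨hle, rfl⟩ | ⟨hw, rfl⟩
  · refine List.mem_append_left _ (List.mem_append_right _ ?_)
    rw [if_pos hle]; exact List.mem_singleton_self _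
  · refine List.mem_append_left _ (List.mem_append_left _ (List.mem_append_right _ ?_))
    rw [if_pos hle]; exact List.mem_singleton_self _
  · refine List.mem_append_left _ (List.mem_append_left _ (List.mem_append_left _ ?_))
    rw [if_pos hw]; exact List.mem_singleton_self _

theorem subset_pushes {t a b : Int} {s : Int × Int} {st : List (Int × Int)} {n : Int × Int}
    (hn : n ∈ st) : n ∈ pushes t a b s st := by
  unfold pushes
  exact List.mem_append_right _ hn

theorem length_pushes {t a b : Int} {s : Int × Int} {st : List (Int × Int)} :
    (pushes t a b s st).length ≤ st.length + 3 := by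
  unfold pushes
  split_ifs <;> simp

theorem final_bound {t a b : Int} (V : Int × Int → Prop) (best : Int)
    (h0 : V (0, 0)) (hcl : ∀ s, V s → ∀ n, Step t a b s n → V n)
    (hbd : ∀ s, V s → s.1 ≤ best) : ∀ s, Reach t a b s → s.1 ≤ best :=
  fun s hr => hbd s (reach_subset_closed V h0 hcl s hr)

theorem loopB_nil (t a b : Int) (fuel : Nat) (seen : List (Int × Int)) (best : Int) :
    loopB t a b fuel seen [] best = best := by
  cases fuel <;> rfl

theorem empty_stack_case (t a b : Int) (seen : List (Int × Int)) (best : Int)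
    (h2 : ∀ s ∈ seen, Reach t a b s ∧ InR t s ∧ s.1 ≤ best)
    (h3 : ∃ s, Reach t a b s ∧ s.1 = best)
    (h4 : ∀ s ∈ seen, ∀ n, Step t a b s n → n ∈ seen)
    (h5 : (0, 0) ∈ seen) :
    (∃ s, Reach t a b s ∧ s.1 = best) ∧ (∀ s, Reach t a b s → s.1 ≤ best) :=
  ⟨h3, final_bound (· ∈ seen) best h5 h4 (fun s hs => (h2 s hs).2.2)⟩

theorem loopB_spec (t a b : Int) (ht : 0 ≤ t) (ha : 0 ≤ a) (hb : 0 ≤ b) :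
    ∀ (fuel : Nat) (seen stack : List (Int × Int)) (best : Int),
    (∀ s ∈ stack, Reach t a b s ∧ InR t s) →
    (∀ s ∈ seen, Reach t a b s ∧ InR t s ∧ s.1 ≤ best) →
    (∃ s, Reach t a b s ∧ s.1 = best) →
    (∀ s ∈ seen, ∀ n, Step t a b s n → n ∈ seen ∨ n ∈ stack) →
    ((0, 0) ∈ seen ∨ (0, 0) ∈ stack) →
    seen.Nodup →
    4 * (2 * (t.toNat + 1) - seen.length) + stack.length ≤ fuel →
    (∃ s, Reach t a b s ∧ s.1 = loopB t a b fuel seen stack best) ∧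
    (∀ s, Reach t a b s → s.1 ≤ loopB t a b fuel seen stack best) := by
  intro fuel
  induction fuel with
  | zero =>
    intro seen stack best h1 h2 h3 h4 h5 hnd hfuel
    cases stack with
    | cons s st => simp [List.length_cons] at hfuel
    | nil =>
      rw [loopB_nil]
      refine empty_stack_case t a b seen best h2 h3 ?_ ?_
      · intro x hx n hstep
        exact (h4 x hx n hstep).resolve_right (List.not_mem_nil)
      · exact h5.resolve_right (List.not_mem_nil)
  | succ fuel ih =>
    intro seen stack best h1 h2 h3 h4 h5 hnd hfuel
    cases stack with
    | nil =>
      rw [loopB_nil]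
      refine empty_stack_case t a b seen best h2 h3 ?_ ?_
      · intro x hx n hstep
        exact (h4 x hx n hstep).resolve_right (List.not_mem_nil)
      · exact h5.resolve_right (List.not_mem_nil)
    | cons s st =>
      obtain ⟨hsR, hsIn⟩ := h1 s List.mem_cons_self
      by_cases hm : s ∈ seen
      · have heq : loopB t a b (fuel + 1) seen (s :: st) best = loopB t a b fuel seen st best := by
          simp [loopB, hm]
        rw [heq]
        refine ih seen st best (fun x hx => h1 x (List.mem_cons_of_mem _ hx)) h2 h3 ?_ ?_ hnd ?_
        · intro x hx n hstep
          rcases h4 x hx n hstep with h | h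
          · exact Or.inl h
          · rcases List.mem_cons.mp h with rfl | h'
            · exact Or.inl hm
            · exact Or.inr h'
        · rcases h5 with h | h
          · exact Or.inl h
          · rcases List.mem_cons.mp h with h' | h'
            · exact Or.inl (h' ▸ hm)
            · exact Or.inr h'
        · simp only [List.length_cons] at hfuel
          omega
      · have heq : loopB t a b (fuel + 1) seen (s :: st) best =
            loopB t a b fuel (seen ++ [s]) (pushes t a b s st) (if s.1 > best then s.1 else best) := by
          simp only [loopB, if_neg hm, PySem.Set.add_of_not_mem hm, pushes]
          split_ifs <;> simp
        rw [heq]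
        have hseen1 : ∀ x ∈ seen ++ [s], Reach t a b x ∧ InR t x ∧
            x.1 ≤ (if s.1 > best then s.1 else best) := by
          intro x hx
          rcases List.mem_append.mp hx with h | h
          · obtain ⟨hr, hi, hle⟩ := h2 x h
            exact ⟨hr, hi, by split <;> omega⟩
          · rcases List.mem_singleton.mp h with rfl
            exact ⟨hsR, hsIn, by split <;> omega⟩
        have hnd1 : (seen ++ [s]).Nodup := by
          refine List.nodup_append.mpr ⟨hnd, List.nodup_singleton _, ?_⟩
          intro x hx y hy
          rcases List.mem_singleton.mp hy with rfl
          intro hcon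
          exact hm (hcon ▸ hx)
        have hcard : (seen ++ [s]).length ≤ 2 * (t.toNat + 1) :=
          length_le_card t _ hnd1 (fun x hx => (hseen1 x hx).2.1)
        refine ih (seen ++ [s]) (pushes t a b s st) (if s.1 > best then s.1 else best)
          ?_ hseen1 ?_ ?_ ?_ hnd1 ?_
        · intro x hx
          rcases mem_pushes hx with h | h
          · exact ⟨Reach_of_step hsR h, InR_of_step ha hb hsIn h⟩
          · exact h1 x (List.mem_cons_of_mem _ h)
        · by_cases hgt : s.1 > best
          · exact ⟨s, hsR, by rw [if_pos hgt]⟩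
          · obtain ⟨x, hxr, hxe⟩ := h3
            exact ⟨x, hxr, by rw [if_neg hgt]; exact hxe⟩
        · intro x hx n hstep
          rcases List.mem_append.mp hx with h | h
          · rcases h4 x h n hstep with h' | h'
            · exact Or.inl (List.mem_append_left _ h')
            · rcases List.mem_cons.mp h' with rfl | h''
              · exact Or.inl (List.mem_append_right _ (List.mem_singleton_self _))
              · exact Or.inr (subset_pushes h'')
          · rcases List.mem_singleton.mp h with rfl
            exact Or.inr (step_mem_pushes hstep)
        · rcases h5 with h | h
          · exact Or.inl (List.mem_append_left _ h)
          · rcases List.mem_cons.mp h with h' | h'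
            · exact Or.inl (h' ▸ List.mem_append_right _ (List.mem_singleton_self _))
            · exact Or.inr (subset_pushes h')
        · have hl3 : (pushes t a b s st).length ≤ st.length + 3 := length_pushes
          simp only [List.length_append, List.length_cons] at hcard hfuel ⊢
          omega

theorem alt_spec (t a b : Int) (ht : 0 ≤ t) (ha : 0 ≤ a) (hb : 0 ≤ b) :
    (∃ s, Reach t a b s ∧ s.1 = max_fullness_alt t a b) ∧
    (∀ s, Reach t a b s → s.1 ≤ max_fullness_alt t a b) := by
  unfold max_fullness_alt
  refine loopB_spec t a b ht ha hb (8 * (t.toNat + 1) + 2) PySem.Set.empty [(0, 0)] 0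
    ?_ ?_ ?_ ?_ ?_ ?_ ?_
  · intro s hs
    rcases List.mem_singleton.mp hs with rfl
    exact ⟨Reach.init, ⟨le_rfl, ht, Or.inl rfl⟩⟩
  · intro s hs
    exact absurd hs (List.not_mem_nil)
  · exact ⟨(0, 0), Reach.init, rfl⟩
  · intro s hs
    exact absurd hs (List.not_mem_nil)
  · exact Or.inr (List.mem_singleton_self _)
  · exact List.nodup_nil
  · simp [PySem.Set.empty]
    omega

-- ----- A side -----

theorem heapPush_perm (x : Int × Int × Int) (h : List (Int × Int × Int)) :
    (heapPush x h).Perm (x :: h) := by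
  induction h with
  | nil => exact List.Perm.refl _
  | cons y ys ih =>
    simp only [heapPush]
    split
    · exact List.Perm.refl _
    · exact (ih.cons y).trans (List.Perm.swap x y ys)

theorem mem_heapPush {x c : Int × Int × Int} {h : List (Int × Int × Int)} :
    c ∈ heapPush x h ↔ c = x ∨ c ∈ h := by
  rw [(heapPush_perm x h).mem_iff]; simp

def rankS (t : Int) (s : Int × Int) : Nat := s.2.toNat * (t.toNat + 2) + s.1.toNat

def wgt (t : Int) (c : Int × Int × Int) : Nat := 4 ^ (2 * (t.toNat + 2) - rankS t (c.2.1, c.2.2))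

def phiA (t : Int) (pq : List (Int × Int × Int)) : Nat := (pq.map (wgt t)).sum

theorem phiA_heapPush (t : Int) (x : Int × Int × Int) (h : List (Int × Int × Int)) :
    phiA t (heapPush x h) = wgt t x + phiA t h := by
  unfold phiA
  rw [((heapPush_perm x h).map (wgt t)).sum_eq]
  simp

def visShape (t : Int) (vis : List (List Bool)) : Prop :=
  vis.length = (t + 1).toNat ∧ ∀ r ∈ vis, r.length = 2

theorem visShape_setVis {t : Int} {vis : List (List Bool)} {f w : Int}
    (hs : visShape t vis) (hf0 : 0 ≤ f) (hft : f ≤ t) (hw : w = 0 ∨ w = 1) :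
    visShape t (setVis vis f w) := by
  obtain ⟨hlen, hrows⟩ := hs
  have hfn : f.toNat < vis.length := by omega
  unfold setVis
  rw [PySem.List.pySetD_of_nonneg vis _ hf0]
  constructor
  · rw [List.length_set]; exact hlen
  · intro r hr
    rcases List.mem_or_eq_of_mem_set hr with hr' | rfl
    · exact hrows r hr'
    · rw [PySem.List.pyGetD_eq_getElem vis _ hf0 (by omega)]
      rcases hw with h | h <;> subst h <;>
        · rw [PySem.List.pySetD_of_nonneg _ _ (by omega), List.length_set]
          exact hrows _ (List.getElem_mem hfn)

theorem getVis_setVis {t : Int} {vis : List (List Bool)} {f w f' w' : Int} (ht : 0 ≤ t)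
    (hs : visShape t vis) (hf0 : 0 ≤ f) (hft : f ≤ t) (hw : w = 0 ∨ w = 1)
    (hf0' : 0 ≤ f') (hft' : f' ≤ t) (hw' : w' = 0 ∨ w' = 1) :
    getVis (setVis vis f w) f' w' = if f' = f ∧ w' = w then true else getVis vis f' w' := by
  obtain ⟨hlen, hrows⟩ := hs
  have hfn : f.toNat < vis.length := by omega
  have hfn' : f'.toNat < vis.length := by omega
  have hrlen : (vis[f.toNat]).length = 2 := hrows _ (List.getElem_mem hfn)
  have hrlen' : (vis[f'.toNat]).length = 2 := hrows _ (List.getElem_mem hfn')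
  obtain ⟨x, y, hxy⟩ := List.length_eq_two.mp hrlen
  obtain ⟨x', y', hxy'⟩ := List.length_eq_two.mp hrlen'
  unfold getVis setVis
  rw [PySem.List.pyGetD_eq_getElem vis ([] : List Bool) hf0 (by omega)]
  rw [PySem.List.pySetD_of_nonneg vis _ hf0]
  rw [PySem.List.pyGetD_eq_getElem (vis.set f.toNat (PySem.List.pySetD vis[f.toNat] w true))
        ([] : List Bool) hf0' (by rw [List.length_set]; omega)]
  rw [PySem.List.pyGetD_eq_getElem vis ([] : List Bool) hf0' (by omega)]
  by_cases hff : f' = f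
  · subst hff
    rw [List.getElem_set_self (by rw [List.length_set]; exact hfn')]
    rw [hxy]
    rcases hw with rfl | rfl <;> rcases hw' with rfl | rfl <;>
      norm_num [PySem.List.pySetD, PySem.List.pySet?, PySem.List.pyGetD, PySem.List.pyGet?, PySem.List.pyIdx?]
  · rw [List.getElem_set_ne (by omega)]
    simp only [hff, false_and, if_false]

theorem push_facts (t : Int) (cond : Prop) [inst : Decidable cond] (x : Int × Int × Int)
    (pq : List (Int × Int × Int)) :
    (∀ c ∈ (if cond then heapPush x pq else pq), c ∈ pq ∨ (cond ∧ c = x)) ∧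
    (∀ c ∈ pq, c ∈ (if cond then heapPush x pq else pq)) ∧
    (cond → x ∈ (if cond then heapPush x pq else pq)) ∧
    phiA t (if cond then heapPush x pq else pq) ≤ phiA t pq + (if cond then wgt t x else 0) := by
  split_ifs with hc
  · refine ⟨?_, ?_, ?_, ?_⟩
    · intro c hcm
      rcases mem_heapPush.mp hcm with h | h
      · exact Or.inr ⟨hc, h⟩
      · exact Or.inl h
    · intro c hcm
      exact mem_heapPush.mpr (Or.inr hcm)
    · intro _
      exact mem_heapPush.mpr (Or.inl rfl)
    · rw [phiA_heapPush]; omega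
  · exact ⟨fun c hcm => Or.inl hcm, fun c hcm => hcm, fun h => absurd h hc, by omega⟩

theorem phiA_cons (t : Int) (e : Int × Int × Int) (rest : List (Int × Int × Int)) :
    phiA t (e :: rest) = wgt t e + phiA t rest := by
  simp [phiA]

theorem rankS_lt_M {t : Int} {s : Int × Int} (hIn : InR t s) :
    rankS t s < 2 * (t.toNat + 2) := by
  obtain ⟨h0, h1, h2⟩ := hIn
  unfold rankS
  rcases h2 with h | h <;> rw [h] <;> simp <;> omega

theorem loopA_nil (t a b : Int) (fuel : Nat) (vis : List (List Bool)) (mf : Int) :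
    loopA t a b fuel vis [] mf = mf := by
  cases fuel <;> rfl

theorem loopA_spec (t a b : Int) (ht : 0 ≤ t) (ha : 0 ≤ a) (hb : 0 ≤ b) :
    ∀ (fuel : Nat) (vis : List (List Bool)) (pq : List (Int × Int × Int)) (mf : Int),
    visShape t vis →
    (∀ c ∈ pq, Reach t a b (c.2.1, c.2.2) ∧ InR t (c.2.1, c.2.2)) →
    (∀ s, InR t s → getVis vis s.1 s.2 = true → Reach t a b s ∧ s.1 ≤ mf) →
    (∃ s, Reach t a b s ∧ s.1 = mf) →
    (∀ s, InR t s → getVis vis s.1 s.2 = true → ∀ n, Step t a b s n →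
       getVis vis n.1 n.2 = true ∨ (∃ c ∈ pq, (c.2.1, c.2.2) = n)) →
    (getVis vis 0 0 = true ∨ (∃ c ∈ pq, (c.2.1, c.2.2) = (0, 0))) →
    phiA t pq ≤ fuel →
    (∃ s, Reach t a b s ∧ s.1 = loopA t a b fuel vis pq mf) ∧
    (∀ s, Reach t a b s → s.1 ≤ loopA t a b fuel vis pq mf) := by
  intro fuel
  induction fuel with
  | zero =>
    intro vis pq mf hsh h1 h2 h3 h4 h5 hfuel
    cases pq with
    | cons e rest =>
      rw [phiA_cons] at hfuel
      have : 0 < wgt t e := pow_pos (by norm_num : 0 < (4:Nat)) _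
      omega
    | nil =>
      rw [loopA_nil]
      refine ⟨h3, ?_⟩
      refine final_bound (fun s => InR t s ∧ getVis vis s.1 s.2 = true) mf ?_ ?_
        (fun s hs => (h2 s hs.1 hs.2).2)
      · refine ⟨⟨le_rfl, ht, Or.inl rfl⟩, ?_⟩
        rcases h5 with h | ⟨c, hc, _⟩
        · exact h
        · exact absurd hc (List.not_mem_nil)
      · rintro s ⟨hIn, hg⟩ n hstep
        refine ⟨InR_of_step ha hb hIn hstep, ?_⟩
        rcases h4 s hIn hg n hstep with h | ⟨c, hc, _⟩
        · exact h
        · exact absurd hc (List.not_mem_nil)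
  | succ fuel ih =>
    intro vis pq mf hsh h1 h2 h3 h4 h5 hfuel
    cases pq with
    | nil =>
      rw [loopA_nil]
      refine ⟨h3, ?_⟩
      refine final_bound (fun s => InR t s ∧ getVis vis s.1 s.2 = true) mf ?_ ?_
        (fun s hs => (h2 s hs.1 hs.2).2)
      · refine ⟨⟨le_rfl, ht, Or.inl rfl⟩, ?_⟩
        rcases h5 with h | ⟨c, hc, _⟩
        · exact h
        · exact absurd hc (List.not_mem_nil)
      · rintro s ⟨hIn, hg⟩ n hstep
        refine ⟨InR_of_step ha hb hIn hstep, ?_⟩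
        rcases h4 s hIn hg n hstep with h | ⟨c, hc, _⟩
        · exact h
        · exact absurd hc (List.not_mem_nil)
    | cons e rest =>
      obtain ⟨nf0, f, w⟩ := e
      obtain ⟨hsR0, hsIn0⟩ := h1 (nf0, f, w) List.mem_cons_self
      have hsR : Reach t a b (f, w) := hsR0
      have hsIn : InR t (f, w) := hsIn0
      have hf0 : 0 ≤ f := hsIn.1
      have hft : f ≤ t := hsIn.2.1
      have hwv : w = 0 ∨ w = 1 := hsIn.2.2
      -- abbreviations
      have hsh1 : visShape t (setVis vis f w) := visShape_setVis ⟨hsh.1, hsh.2⟩ hf0 hft hwv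
      -- getVis on the updated table
      have hgv : ∀ f' w', 0 ≤ f' → f' ≤ t → (w' = 0 ∨ w' = 1) →
          getVis (setVis vis f w) f' w' = if f' = f ∧ w' = w then true else getVis vis f' w' :=
        fun f' w' h0 h1' h2' => getVis_setVis ht hsh hf0 hft hwv h0 h1' h2'
      have hgvself : getVis (setVis vis f w) f w = true := by
        rw [hgv f w hf0 hft hwv]; simp
      simp only [loopA]
      -- names for the three conditional pushes
      have pf1 := push_facts t (f + a ≤ t ∧ ¬(getVis (setVis vis f w) (f + a) w = true))
        (-(f + a), f + a, w) rest
      set pq1 := if f + a ≤ t ∧ ¬(getVis (setVis vis f w) (f + a) w = true) then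
        heapPush (-(f + a), f + a, w) rest else rest with hpq1
      have pf2 := push_facts t (f + b ≤ t ∧ ¬(getVis (setVis vis f w) (f + b) w = true))
        (-(f + b), f + b, w) pq1
      set pq2 := if f + b ≤ t ∧ ¬(getVis (setVis vis f w) (f + b) w = true) then
        heapPush (-(f + b), f + b, w) pq1 else pq1 with hpq2
      have pf3 := push_facts t (¬(getVis (setVis vis f w) (PySem.Int.floordiv f 2) 1 = true))
        (-(PySem.Int.floordiv f 2), PySem.Int.floordiv f 2, 1) pq2
      set pq3 := if w = 0 then
          (if ¬(getVis (setVis vis f w) (PySem.Int.floordiv f 2) 1 = true) then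
            heapPush (-(PySem.Int.floordiv f 2), PySem.Int.floordiv f 2, 1) pq2
          else pq2)
        else pq2 with hpq3
      -- decomposition of pq3's members
      have hmem3 : ∀ c ∈ pq3, c ∈ rest ∨
          ((f + a ≤ t ∧ ¬(getVis (setVis vis f w) (f + a) w = true)) ∧ c = (-(f + a), f + a, w)) ∨
          ((f + b ≤ t ∧ ¬(getVis (setVis vis f w) (f + b) w = true)) ∧ c = (-(f + b), f + b, w)) ∨
          (w = 0 ∧ c = (-(PySem.Int.floordiv f 2), PySem.Int.floordiv f 2, 1)) := by
        intro c hc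
        have hc2 : c ∈ pq2 ∨ (w = 0 ∧ c = (-(PySem.Int.floordiv f 2), PySem.Int.floordiv f 2, 1)) := by
          rw [hpq3] at hc
          by_cases hw0 : w = 0
          · rw [if_pos hw0] at hc
            rcases pf3.1 c hc with h | ⟨_, h⟩
            · exact Or.inl h
            · exact Or.inr ⟨hw0, h⟩
          · rw [if_neg hw0] at hc
            exact Or.inl hc
        rcases hc2 with hc2 | h
        · rcases pf2.1 c hc2 with hc1 | ⟨hcond, h⟩
          · rcases pf1.1 c hc1 with h | ⟨hcond, h⟩
            · exact Or.inl h
            · exact Or.inr (Or.inl ⟨hcond, h⟩)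
          · exact Or.inr (Or.inr (Or.inl ⟨hcond, h⟩))
        · exact Or.inr (Or.inr (Or.inr h))
      have hpq2in3 : ∀ c ∈ pq2, c ∈ pq3 := by
        intro c hc
        rw [hpq3]
        split_ifs with hw0 hgg <;> first | exact hc | exact mem_heapPush.mpr (Or.inr hc)
      have hrest3 : ∀ c ∈ rest, c ∈ pq3 :=
        fun c hc => hpq2in3 c (pf2.2.1 c (pf1.2.1 c hc))
      refine ih (setVis vis f w) pq3 (max mf f) hsh1 ?_ ?_ ?_ ?_ ?_ ?_
      -- h1': members reachable and in range
      · intro c hc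
        rcases hmem3 c hc with h | ⟨⟨hle, _⟩, rfl⟩ | ⟨⟨hle, _⟩, rfl⟩ | ⟨hw0, rfl⟩
        · exact h1 c (List.mem_cons_of_mem _ h)
        · exact ⟨Reach.stepA hsR hle, ⟨show (0:Int) ≤ f + a by omega, hle, hwv⟩⟩
        · exact ⟨Reach.stepB hsR hle, ⟨show (0:Int) ≤ f + b by omega, hle, hwv⟩⟩
        · have hR0 : Reach t a b (f, 0) := hw0 ▸ hsR
          have hfd := floordiv_two_bounds hf0
          exact ⟨Reach.half hR0, ⟨hfd.1, show PySem.Int.floordiv f 2 ≤ t by omega, Or.inr rfl⟩⟩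
      -- h2': visited states reachable and bounded
      · rintro ⟨f', w'⟩ hIn' hg'
        have h0' : 0 ≤ f' := hIn'.1
        have h1' : f' ≤ t := hIn'.2.1
        have h2' : w' = 0 ∨ w' = 1 := hIn'.2.2
        rw [hgv f' w' h0' h1' h2'] at hg'
        by_cases hseq : f' = f ∧ w' = w
        · obtain ⟨rfl, rfl⟩ := hseq
          exact ⟨hsR, le_max_right _ _⟩
        · rw [if_neg hseq] at hg'
          obtain ⟨hr, hle⟩ := h2 (f', w') hIn' hg'
          exact ⟨hr, le_trans hle (le_max_left _ _)⟩
      -- h3': witness for the new max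
      · rcases max_choice mf f with hmc | hmc
        · obtain ⟨x, hxr, hxe⟩ := h3
          exact ⟨x, hxr, by rw [hmc]; exact hxe⟩
        · exact ⟨(f, w), hsR, by rw [hmc]⟩
      -- h4': closure
      · rintro ⟨f', w'⟩ hIn' hg' n hstep
        have h0' : 0 ≤ f' := hIn'.1
        have h1' : f' ≤ t := hIn'.2.1
        have h2' : w' = 0 ∨ w' = 1 := hIn'.2.2
        have hnIn := InR_of_step ha hb hIn' hstep
        by_cases hgn : getVis (setVis vis f w) n.1 n.2 = true
        · exact Or.inl hgn
        · right
          rw [hgv f' w' h0' h1' h2'] at hg'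
          by_cases hseq : f' = f ∧ w' = w
          · obtain ⟨rfl, rfl⟩ := hseq
            rcases hstep with ⟨hle, rfl⟩ | ⟨hle, rfl⟩ | ⟨hw0, rfl⟩
            · refine ⟨(-(f' + a), f' + a, w'), ?_, rfl⟩
              exact hpq2in3 _ (pf2.2.1 _ (pf1.2.2.1 ⟨hle, hgn⟩))
            · refine ⟨(-(f' + b), f' + b, w'), ?_, rfl⟩
              exact hpq2in3 _ (pf2.2.2.1 ⟨hle, hgn⟩)
            · refine ⟨(-(PySem.Int.floordiv f' 2), PySem.Int.floordiv f' 2, 1), ?_, rfl⟩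
              rw [hpq3]
              rw [if_pos hw0, if_pos hgn]
              exact mem_heapPush.mpr (Or.inl rfl)
          · rw [if_neg hseq] at hg'
            rcases h4 (f', w') hIn' hg' n hstep with h | ⟨c, hc, hcs⟩
            · exfalso
              apply hgn
              rw [hgv n.1 n.2 hnIn.1 hnIn.2.1 hnIn.2.2]
              split <;> [rfl; exact h]
            · rcases List.mem_cons.mp hc with rfl | hcr
              · exfalso
                apply hgn
                have : n = ((f : Int), (w : Int)) := by
                  rw [← hcs]
                rw [this]
                exact hgvself
              · exact ⟨c, hrest3 c hcr, hcs⟩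
      -- h5': the origin is covered
      · rcases h5 with h | ⟨c, hc, hcs⟩
        · left
          have h00 := hgv 0 0 le_rfl ht (Or.inl rfl)
          rw [h00]
          split <;> [rfl; exact h]
        · rcases List.mem_cons.mp hc with rfl | hcr
          · left
            have hfw : f = 0 ∧ w = 0 := by
              have h1c : f = 0 := congrArg Prod.fst hcs
              have h2c : w = 0 := congrArg Prod.snd hcs
              exact ⟨h1c, h2c⟩
            obtain ⟨rfl, rfl⟩ := hfw
            exact hgvself
          · exact Or.inr ⟨c, hrest3 c hcr, hcs⟩
      -- fuel: the potential strictly decreases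
      · have hM : rankS t (f, w) < 2 * (t.toNat + 2) := rankS_lt_M hsIn
        have hW1 : (f + a ≤ t ∧ ¬(getVis (setVis vis f w) (f + a) w = true)) →
            wgt t (-(f + a), f + a, w) ≤ 4 ^ (2 * (t.toNat + 2) - rankS t (f, w) - 1) := by
          rintro ⟨hle, hng⟩
          have ha1 : 1 ≤ a := by
            rcases lt_or_ge 0 a with h | h
            · omega
            · exfalso
              have haz : a = 0 := by omega
              apply hng
              rw [haz, add_zero]
              exact hgvself
          have hr : rankS t (f, w) + 1 ≤ rankS t (f + a, w) := by
            unfold rankS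
            rcases hwv with rfl | rfl <;> simp <;> omega
          have he : wgt t (-(f + a), f + a, w) = 4 ^ (2 * (t.toNat + 2) - rankS t (f + a, w)) := rfl
          rw [he]
          exact Nat.pow_le_pow_right (by norm_num) (by omega)
        have hW2 : (f + b ≤ t ∧ ¬(getVis (setVis vis f w) (f + b) w = true)) →
            wgt t (-(f + b), f + b, w) ≤ 4 ^ (2 * (t.toNat + 2) - rankS t (f, w) - 1) := by
          rintro ⟨hle, hng⟩
          have hb1 : 1 ≤ b := by
            rcases lt_or_ge 0 b with h | h
            · omega
            · exfalso
              have hbz : b = 0 := by omega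
              apply hng
              rw [hbz, add_zero]
              exact hgvself
          have hr : rankS t (f, w) + 1 ≤ rankS t (f + b, w) := by
            unfold rankS
            rcases hwv with rfl | rfl <;> simp <;> omega
          have he : wgt t (-(f + b), f + b, w) = 4 ^ (2 * (t.toNat + 2) - rankS t (f + b, w)) := rfl
          rw [he]
          exact Nat.pow_le_pow_right (by norm_num) (by omega)
        have hW3 : w = 0 →
            wgt t (-(PySem.Int.floordiv f 2), PySem.Int.floordiv f 2, 1) ≤
              4 ^ (2 * (t.toNat + 2) - rankS t (f, w) - 1) := by
          rintro rfl
          have hfd := floordiv_two_bounds hf0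
          have hr : rankS t (f, 0) + 1 ≤ rankS t (PySem.Int.floordiv f 2, 1) := by
            unfold rankS
            simp
            omega
          have he : wgt t (-(PySem.Int.floordiv f 2), PySem.Int.floordiv f 2, 1) =
              4 ^ (2 * (t.toNat + 2) - rankS t (PySem.Int.floordiv f 2, 1)) := rfl
          rw [he]
          exact Nat.pow_le_pow_right (by norm_num) (by omega)
        have hphi3 : phiA t pq3 ≤ phiA t pq2 +
            (if w = 0 then (if ¬(getVis (setVis vis f w) (PySem.Int.floordiv f 2) 1 = true) then
              wgt t (-(PySem.Int.floordiv f 2), PySem.Int.floordiv f 2, 1) else 0) else 0) := by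
          rw [hpq3]
          by_cases hw0 : w = 0
          · rw [if_pos hw0, if_pos hw0]
            exact pf3.2.2.2
          · rw [if_neg hw0, if_neg hw0]
            omega
        have hphi2 := pf2.2.2.2
        have hphi1 := pf1.2.2.2
        have hwgt_e : wgt t ((nf0 : Int), (f : Int), (w : Int)) =
            4 * 4 ^ (2 * (t.toNat + 2) - rankS t (f, w) - 1) := by
          have he : wgt t ((nf0 : Int), (f : Int), (w : Int)) =
              4 ^ (2 * (t.toNat + 2) - rankS t (f, w)) := rfl
          have hstep : 2 * (t.toNat + 2) - rankS t (f, w) =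
              (2 * (t.toNat + 2) - rankS t (f, w) - 1) + 1 := by omega
          rw [he, hstep, pow_succ]
          exact Nat.mul_comm _ _
        rw [phiA_cons, hwgt_e] at hfuel
        have hpos : 0 < 4 ^ (2 * (t.toNat + 2) - rankS t (f, w) - 1) :=
          pow_pos (by norm_num : 0 < (4:Nat)) _
        -- combine the three conditional bounds
        have hi1 : (if f + a ≤ t ∧ ¬(getVis (setVis vis f w) (f + a) w = true) then
            wgt t (-(f + a), f + a, w) else 0) ≤
            4 ^ (2 * (t.toNat + 2) - rankS t (f, w) - 1) := by
          by_cases hc : f + a ≤ t ∧ ¬(getVis (setVis vis f w) (f + a) w = true)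
          · rw [if_pos hc]; exact hW1 hc
          · rw [if_neg hc]; exact Nat.zero_le _
        have hi2 : (if f + b ≤ t ∧ ¬(getVis (setVis vis f w) (f + b) w = true) then
            wgt t (-(f + b), f + b, w) else 0) ≤
            4 ^ (2 * (t.toNat + 2) - rankS t (f, w) - 1) := by
          by_cases hc : f + b ≤ t ∧ ¬(getVis (setVis vis f w) (f + b) w = true)
          · rw [if_pos hc]; exact hW2 hc
          · rw [if_neg hc]; exact Nat.zero_le _
        have hi3 : (if w = 0 then (if ¬(getVis (setVis vis f w) (PySem.Int.floordiv f 2) 1 = true) then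
            wgt t (-(PySem.Int.floordiv f 2), PySem.Int.floordiv f 2, 1) else 0) else 0) ≤
            4 ^ (2 * (t.toNat + 2) - rankS t (f, w) - 1) := by
          by_cases hc : w = 0
          · rw [if_pos hc]
            by_cases hgg : ¬(getVis (setVis vis f w) (PySem.Int.floordiv f 2) 1 = true)
            · rw [if_pos hgg]; exact hW3 hc
            · rw [if_neg hgg]; exact Nat.zero_le _
          · rw [if_neg hc]; exact Nat.zero_le _
        omega

theorem getVis_init (t : Int) (f w : Int) (ht : 0 ≤ t) (hf0 : 0 ≤ f) (hft : f ≤ t)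
    (hw : w = 0 ∨ w = 1) :
    getVis ((PySem.List.pyRange 0 (t + 1) 1).map (fun _ => [false, false])) f w = false := by
  have hlen : ((PySem.List.pyRange 0 (t + 1) 1).map
      (fun _ => ([false, false] : List Bool))).length = (t + 1 - 0).toNat := by
    rw [List.length_map, PySem.List.length_pyRange_one]
  unfold getVis
  rw [PySem.List.pyGetD_eq_getElem _ _ hf0 (by rw [hlen]; omega)]
  rw [List.getElem_map]
  rcases hw with rfl | rfl
  · rw [PySem.List.pyGetD_eq_getElem _ _ le_rfl (by simp)]
    rfl
  · rw [PySem.List.pyGetD_eq_getElem _ _ (by norm_num) (by simp)]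
    rfl

theorem a_spec (t a b : Int) (ht : 0 ≤ t) (ha : 0 ≤ a) (hb : 0 ≤ b) :
    (∃ s, Reach t a b s ∧ s.1 = max_fullness t a b) ∧
    (∀ s, Reach t a b s → s.1 ≤ max_fullness t a b) := by
  have heq : max_fullness t a b = loopA t a b (4 ^ (2 * (t.toNat + 2)))
      ((PySem.List.pyRange 0 (t + 1) 1).map (fun _ => [false, false])) [(0, 0, 0)] 0 := rfl
  rw [heq]
  refine loopA_spec t a b ht ha hb (4 ^ (2 * (t.toNat + 2)))
    ((PySem.List.pyRange 0 (t + 1) 1).map (fun _ => [false, false])) [(0, 0, 0)] 0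
    ?_ ?_ ?_ ?_ ?_ ?_ ?_
  · constructor
    · rw [List.length_map, PySem.List.length_pyRange_one]
      omega
    · intro r hr
      obtain ⟨x, _, rfl⟩ := List.mem_map.mp hr
      rfl
  · intro c hc
    rcases List.mem_singleton.mp hc with rfl
    exact ⟨Reach.init, ⟨le_rfl, ht, Or.inl rfl⟩⟩
  · rintro ⟨f', w'⟩ hIn hg
    rw [getVis_init t f' w' ht hIn.1 hIn.2.1 hIn.2.2] at hg
    cases hg
  · exact ⟨(0, 0), Reach.init, rfl⟩
  · rintro ⟨f', w'⟩ hIn hg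
    rw [getVis_init t f' w' ht hIn.1 hIn.2.1 hIn.2.2] at hg
    cases hg
  · exact Or.inr ⟨(0, 0, 0), List.mem_singleton_self _, rfl⟩
  · have : phiA t [(0, 0, 0)] = wgt t (0, 0, 0) := by simp [phiA]
    rw [this]
    have : wgt t ((0 : Int), (0 : Int), (0 : Int)) = 4 ^ (2 * (t.toNat + 2)) := by
      unfold wgt rankS
      norm_num
    rw [this]

-- ===== VERDICT (by name: the statement is the Claim_ definition above) =====
theorem max_fullness_spec : Claim_equal_max_fullness := by
  intro t a b _ hpre
  obtain ⟨ht, ha, hb⟩ := hpre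
  obtain ⟨⟨sa, hra, hsa⟩, hma⟩ := a_spec t a b ht ha hb
  obtain ⟨⟨sb, hrb, hsb⟩, hmb⟩ := alt_spec t a b ht ha hb
  unfold Spec_max_fullness
  have h1 := hmb sa hra
  have h2 := hma sb hrb
  omega
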